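-- pv_equiv track=rewrite | github.com/AmanPandita/Algorithms-and-Data-Structures | quiz3/quiz3.py | satisfy_dogs
-- ===== SOURCE A (Python) =====
-- def satisfy_dogs(hunger_levels, biscuit_sizes):
--     # Sort the hunger levels and biscuit sizes in ascending order
--     hunger_levels.sort()
--     biscuit_sizes.sort()
--
--     satisfied_dogs = 0
--     current_biscuit = 0
--
--     # Iterate through each dog's hunger level
--     for hunger in hunger_levels:
--         # Iterate through the biscuit sizes to find a suitable biscuit
--         while current_biscuit < len(biscuit_sizes) and biscuit_sizes[current_biscuit] < hunger:
--             current_biscuit += 1  # Move to the next larger biscuit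
--
--         # Check if a suitable biscuit was found
--         if current_biscuit < len(biscuit_sizes):
--             satisfied_dogs += 1  # Satisfy the current dog
--             current_biscuit += 1  # Use this biscuit and move to the next
--
--     return satisfied_dogs
-- ===== SOURCE B (Python) =====
-- def satisfy_dogs(hunger_levels, biscuit_sizes):
--     # Sort both lists in place, as A does (same observable mutation).
--     hunger_levels.sort()
--     biscuit_sizes.sort()
--
--     n, m = len(hunger_levels), len(biscuit_sizes)
--
--     # Hall-deficiency formula instead of greedy matching: the number of
--     # UNSATISFIABLE dogs equals the maximum, over thresholds x, of
--     #   (#dogs with hunger >= x) - (#biscuits of size >= x),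
--     # and it suffices to take x over the hunger values.  For the dog at
--     # sorted position i, (n - i) dogs have hunger >= hunger_levels[i]
--     # (exact at the first dog of each equal run, which realises the max),
--     # and the biscuit count comes from a binary search.
--     max_deficit = 0
--     for i, x in enumerate(hunger_levels):
--         # first index whose biscuit is >= x, by binary search
--         lo, hi = 0, m
--         while lo < hi:
--             mid = (lo + hi) // 2
--             if biscuit_sizes[mid] < x:
--                 lo = mid + 1
--             else:
--                 hi = mid
--         d = (n - i) - (m - lo)
--         if d > max_deficit:
--             max_deficit = d
--
--     return n - max_deficit
-- ===== Notes on version B (the rewrite author's own statement) =====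
-- stated objective: alternative
-- what changed: B abandons the greedy two-pointer matching entirely: it computes the number of unsatisfiable dogs by the Hall-deficiency formula max over hunger thresholds of (#dogs hungry >= x) - (#biscuits >= x), counting biscuits per threshold with a binary search, and returns n minus that maximum.
import Mathlib
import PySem

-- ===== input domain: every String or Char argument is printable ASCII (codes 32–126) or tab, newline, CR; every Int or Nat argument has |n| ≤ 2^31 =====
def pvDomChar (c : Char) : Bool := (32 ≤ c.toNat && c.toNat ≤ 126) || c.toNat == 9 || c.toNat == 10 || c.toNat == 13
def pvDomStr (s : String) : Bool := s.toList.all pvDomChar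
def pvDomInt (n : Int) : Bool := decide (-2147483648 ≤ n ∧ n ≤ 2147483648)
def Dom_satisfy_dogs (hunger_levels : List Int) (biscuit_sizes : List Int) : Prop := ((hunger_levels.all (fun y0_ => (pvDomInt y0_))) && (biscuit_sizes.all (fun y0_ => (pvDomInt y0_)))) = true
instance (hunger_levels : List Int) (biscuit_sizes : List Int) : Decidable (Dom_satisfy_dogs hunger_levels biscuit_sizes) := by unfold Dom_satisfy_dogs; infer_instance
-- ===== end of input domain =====

-- B replaces A's greedy two-pointer matching by the Hall-deficiency formula:
-- unsatisfiable dogs = max over hunger thresholds x of (#dogs >= x) - (#biscuits >= x),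
-- biscuit counts by binary search (objective: alternative algorithm, similar cost).
-- Both Pythons sort their arguments in place; the equivalence proved here is about the
-- return value (B performs the same in-place sorts as A).

-- ===== PORT A =====
-- the inner `while current_biscuit < len(biscuit_sizes) and biscuit_sizes[current_biscuit] < hunger`
def pvSkip (bs : List Int) (hunger : Int) (j : Nat) : Nat :=
  if hj : j < bs.length then
    if bs[j] < hunger then pvSkip bs hunger (j + 1) else j
  else j
termination_by bs.length - j

def satisfy_dogs (hunger_levels : List Int) (biscuit_sizes : List Int) : Int :=
  let hs := PySem.List.sorted hunger_levels (fun x => x) false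
  let bs := PySem.List.sorted biscuit_sizes (fun x => x) false
  (hs.foldl (fun (st : Int × Nat) hunger =>
      let j := pvSkip bs hunger st.2
      if j < bs.length then (st.1 + 1, j + 1) else (st.1, j)) (0, 0)).1

-- ===== PORT B =====
-- the hand-written `while lo < hi` binary search of Source B (biscuit_sizes[mid] is in range
-- whenever it is read, since mid < hi ≤ len; getD is exact there)
def pvBSearch (bs : List Int) (x : Int) (lo hi : Nat) : Nat :=
  if lo < hi then
    if bs.getD ((lo + hi) / 2) 0 < x then pvBSearch bs x ((lo + hi) / 2 + 1) hi
    else pvBSearch bs x lo ((lo + hi) / 2)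
  else lo
termination_by hi - lo
decreasing_by all_goals omega

def satisfy_dogs_alt (hunger_levels : List Int) (biscuit_sizes : List Int) : Int :=
  let h := PySem.List.sorted hunger_levels (fun x => x) false
  let b := PySem.List.sorted biscuit_sizes (fun x => x) false
  let n := h.length
  let m := b.length
  let md := (PySem.List.enumerate h 0).foldl (fun (md : Int) ix =>
      let lo := pvBSearch b ix.2 0 m
      let d := ((n : Int) - ix.1) - ((m : Int) - (lo : Int))
      if md < d then d else md) 0
  (n : Int) - md

-- ===== PRECONDITION & SPEC =====
def Spec_satisfy_dogs (hunger_levels : List Int) (biscuit_sizes : List Int) (out : Int) : Prop := out = satisfy_dogs_alt hunger_levels biscuit_sizes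
instance (hunger_levels : List Int) (biscuit_sizes : List Int) (out : Int) : Decidable (Spec_satisfy_dogs hunger_levels biscuit_sizes out) := by unfold Spec_satisfy_dogs; infer_instance

-- ===== CLAIM (what is proved, stated in full; the proofs are below) =====
def Claim_equal_satisfy_dogs : Prop := ∀ (hunger_levels : List Int) (biscuit_sizes : List Int), Dom_satisfy_dogs hunger_levels biscuit_sizes → Spec_satisfy_dogs hunger_levels biscuit_sizes (satisfy_dogs hunger_levels biscuit_sizes)

-- ===== LEMMAS AND PROOFS =====

-- reference greedy both programs compute: match each biscuit (ascending) with the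
-- smallest still-unsatisfied dog it can feed
def pvGreedy : List Int → List Int → Int
  | [], _ => 0
  | _, [] => 0
  | h :: hs, b :: bs => if b < h then pvGreedy (h :: hs) bs else 1 + pvGreedy hs bs

theorem pvGreedy_nil_right (hs : List Int) : pvGreedy hs [] = 0 := by
  cases hs <;> simp [pvGreedy]

theorem pvSkip_le (bs : List Int) (h : Int) (j : Nat) (hle : j ≤ bs.length) :
    pvSkip bs h j ≤ bs.length := by
  revert hle
  induction j using pvSkip.induct bs h with
  | case1 j hj hb ih => intro _; rw [pvSkip]; simp [hj, hb]; exact ih hj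
  | case2 j hj hb => intro _; rw [pvSkip]; simp [hj, hb]; omega
  | case3 j hj => intro hle; rw [pvSkip]; simp [hj]; exact hle

theorem pvSkip_not_lt (bs : List Int) (h : Int) (j : Nat)
    (hlt : pvSkip bs h j < bs.length) : ¬ bs[pvSkip bs h j]'hlt < h := by
  revert hlt
  induction j using pvSkip.induct bs h with
  | case1 j hj hb ih =>
      intro hlt
      have e : pvSkip bs h j = pvSkip bs h (j + 1) := by rw [pvSkip]; simp [hj, hb]
      intro hc
      exact ih (e ▸ hlt) (by simpa [e] using hc)
  | case2 j hj hb =>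
      intro hlt
      have e : pvSkip bs h j = j := by rw [pvSkip]; simp [hj, hb]
      intro hc; apply hb; simpa [e] using hc
  | case3 j hj =>
      intro hlt
      have e : pvSkip bs h j = j := by rw [pvSkip]; simp [hj]
      omega

theorem pvSkip_greedy (bs : List Int) (h : Int) (j : Nat) (hs : List Int) :
    pvGreedy (h :: hs) (bs.drop j) = pvGreedy (h :: hs) (bs.drop (pvSkip bs h j)) := by
  induction j using pvSkip.induct bs h with
  | case1 j hj hb ih =>
      have e : pvSkip bs h j = pvSkip bs h (j + 1) := by rw [pvSkip]; simp [hj, hb]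
      rw [e, ← ih]
      rw [List.drop_eq_getElem_cons hj]
      simp [pvGreedy, hb]
  | case2 j hj hb =>
      have e : pvSkip bs h j = j := by rw [pvSkip]; simp [hj, hb]
      rw [e]
  | case3 j hj =>
      have e : pvSkip bs h j = j := by rw [pvSkip]; simp [hj]
      rw [e]

theorem foldA_greedy (hs bs : List Int) (c : Int) (j : Nat) (hle : j ≤ bs.length) :
    (hs.foldl (fun (st : Int × Nat) hunger =>
        let j := pvSkip bs hunger st.2
        if j < bs.length then (st.1 + 1, j + 1) else (st.1, j)) (c, j)).1
      = c + pvGreedy hs (bs.drop j) := by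
  induction hs generalizing c j with
  | nil => simp [pvGreedy]
  | cons h hs ih =>
      simp only [List.foldl_cons]
      have hg := pvSkip_greedy bs h j hs
      by_cases hlt : pvSkip bs h j < bs.length
      · have hnb := pvSkip_not_lt bs h j hlt
        rw [List.drop_eq_getElem_cons hlt] at hg
        simp only [hlt, if_pos]
        rw [ih (c + 1) (pvSkip bs h j + 1) (by omega), hg]
        simp [pvGreedy, hnb]; ring
      · have heq : pvSkip bs h j = bs.length := by
          have := pvSkip_le bs h j hle; omega
        simp only [hlt, if_neg, not_false_iff]
        rw [ih c (pvSkip bs h j) (by omega), hg, heq]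
        simp [pvGreedy_nil_right]

-- number of biscuits of size ≥ x
def pvCntGe (bs : List Int) (x : Int) : Int :=
  ((bs.filter (fun y => decide (x ≤ y))).length : Int)

-- Hall deficiency: max(0, max over suffix positions of |suffix of hs| − #{b ≥ head})
def pvMaxDef : List Int → List Int → Int
  | [], _ => 0
  | x :: t, bs => max ((1 + (t.length : Int)) - pvCntGe bs x) (pvMaxDef t bs)

theorem cntGe_le_length (bs : List Int) (x : Int) : pvCntGe bs x ≤ (bs.length : Int) := by
  have := List.length_filter_le (fun y => decide (x ≤ y)) bs
  simp only [pvCntGe]; exact_mod_cast this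

theorem cntGe_cons (b : Int) (bs : List Int) (x : Int) :
    pvCntGe (b :: bs) x = pvCntGe bs x + if x ≤ b then 1 else 0 := by
  simp only [pvCntGe, List.filter_cons]
  split_ifs with h <;> simp_all

theorem cntGe_all (bs : List Int) (x : Int) (h : ∀ y ∈ bs, x ≤ y) :
    pvCntGe bs x = (bs.length : Int) := by
  simp only [pvCntGe]
  rw [List.filter_eq_self.mpr (by intro y hy; simpa using h y hy)]

theorem maxDef_nonneg (hs bs : List Int) : 0 ≤ pvMaxDef hs bs := by
  induction hs with
  | nil => simp [pvMaxDef]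
  | cons x t ih => simp only [pvMaxDef]; omega

theorem maxDef_bs_nil (hs : List Int) : pvMaxDef hs [] = (hs.length : Int) := by
  induction hs with
  | nil => simp [pvMaxDef]
  | cons x t ih =>
      simp only [pvMaxDef, ih, pvCntGe, List.filter_nil, List.length_nil, List.length_cons]
      push_cast; omega

theorem maxDef_cons_skip (hs bs : List Int) (b : Int) (h : ∀ x ∈ hs, b < x) :
    pvMaxDef hs (b :: bs) = pvMaxDef hs bs := by
  induction hs with
  | nil => simp [pvMaxDef]
  | cons x t ih =>
      have hx : ¬ x ≤ b := by have := h x (by simp); omega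
      simp only [pvMaxDef, cntGe_cons, hx, if_neg, not_false_iff]
      rw [ih (fun y hy => h y (by simp [hy]))]
      omega

theorem maxDef_mono_cons (hs bs : List Int) (b : Int) :
    pvMaxDef hs (b :: bs) ≤ pvMaxDef hs bs := by
  induction hs with
  | nil => simp [pvMaxDef]
  | cons x t ih =>
      simp only [pvMaxDef, cntGe_cons]
      split_ifs with h <;> omega

theorem maxDef_len_lb (hs bs : List Int) (hne : hs ≠ []) :
    (hs.length : Int) - (bs.length : Int) ≤ pvMaxDef hs bs := by
  cases hs with
  | nil => exact absurd rfl hne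
  | cons x t =>
      have := cntGe_le_length bs x
      simp only [pvMaxDef, List.length_cons]
      push_cast; omega

theorem maxDef_ub (hs bs : List Int) (b : Int) (hble : ∀ y ∈ bs, b ≤ y) :
    pvMaxDef hs bs ≤ max ((hs.length : Int) - (bs.length : Int)) (pvMaxDef hs (b :: bs)) := by
  induction hs with
  | nil => simp [pvMaxDef]
  | cons x t ih =>
      simp only [pvMaxDef, List.length_cons] at *
      by_cases hxb : x ≤ b
      · have hall : pvCntGe bs x = (bs.length : Int) :=
          cntGe_all bs x (fun y hy => le_trans hxb (hble y hy))
        have h2 := maxDef_mono_cons t bs b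
        push_cast
        omega
      · have : pvCntGe (b :: bs) x = pvCntGe bs x := by
          rw [cntGe_cons]; simp [hxb]
        push_cast
        omega

-- the heart of the equivalence: on ascending inputs the greedy matching count is
-- the number of dogs minus the Hall deficiency
theorem greedy_maxDef (hs bs : List Int) (hh : hs.Pairwise (· ≤ ·)) (hb : bs.Pairwise (· ≤ ·)) :
    pvGreedy hs bs = (hs.length : Int) - pvMaxDef hs bs := by
  induction hs, bs using pvGreedy.induct with
  | case1 bs => simp [pvGreedy, pvMaxDef]
  | case2 hs hne =>
      cases hs with
      | nil => simp [pvGreedy, pvMaxDef]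
      | cons x t => rw [maxDef_bs_nil]; simp [pvGreedy]
  | case3 h hs b bs hlt ih =>
      have hh' := hh
      rw [List.pairwise_cons] at hh'
      have hskip : pvMaxDef (h :: hs) (b :: bs) = pvMaxDef (h :: hs) bs := by
        apply maxDef_cons_skip
        intro x hx
        rcases List.mem_cons.mp hx with rfl | hx
        · exact hlt
        · exact lt_of_lt_of_le hlt (hh'.1 x hx)
      rw [hskip, ← ih hh (List.Pairwise.of_cons hb)]
      simp [pvGreedy, hlt]
  | case4 h hs b bs hge ih =>
      have hle : h ≤ b := by omega
      have hh' := List.pairwise_cons.mp hh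
      have hb' := List.pairwise_cons.mp hb
      have key : pvMaxDef (h :: hs) (b :: bs) = pvMaxDef hs bs := by
        have hallb : ∀ y ∈ b :: bs, h ≤ y := by
          intro y hy
          rcases List.mem_cons.mp hy with rfl | hy
          · exact hle
          · exact le_trans hle (hb'.1 y hy)
        have hhead : pvCntGe (b :: bs) h = ((b :: bs).length : Int) :=
          cntGe_all _ _ hallb
        simp only [pvMaxDef, hhead, List.length_cons]
        cases hs with
        | nil =>
            have h0 : pvMaxDef ([] : List Int) (b :: bs) = 0 := rfl
            have h1 : pvMaxDef ([] : List Int) bs = 0 := rfl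
            rw [h0, h1]
            apply max_eq_right
            simp only [List.length_nil]
            push_cast
            omega
        | cons x t =>
            have h1 : ((x :: t).length : Int) - ((bs).length : Int) ≤ pvMaxDef (x :: t) bs :=
              maxDef_len_lb _ _ (by simp)
            have h2 : pvMaxDef (x :: t) (b :: bs) ≤ pvMaxDef (x :: t) bs :=
              maxDef_mono_cons _ _ _
            have h3 : pvMaxDef (x :: t) bs ≤
                max (((x :: t).length : Int) - ((bs).length : Int)) (pvMaxDef (x :: t) (b :: bs)) :=
              maxDef_ub _ _ b hb'.1
            simp only [List.length_cons] at *
            push_cast at *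
            omega
      have ihv := ih hh'.2 hb'.2
      rw [key]
      simp only [pvGreedy, if_neg (show ¬ b < h by omega), List.length_cons]
      push_cast
      omega

-- binary-search correctness on an ascending list: the result r has all elements
-- before r below x and all from r on at least x
theorem pvBSearch_boundary (bs : List Int) (x : Int) (hb : bs.Pairwise (· ≤ ·)) :
    ∀ lo hi : Nat, lo ≤ hi → hi ≤ bs.length →
    (∀ k (hk : k < bs.length), k < lo → bs[k] < x) →
    (∀ k (hk : k < bs.length), hi ≤ k → x ≤ bs[k]) →
    pvBSearch bs x lo hi ≤ bs.length ∧
    (∀ k (hk : k < bs.length), k < pvBSearch bs x lo hi → bs[k] < x) ∧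
    (∀ k (hk : k < bs.length), pvBSearch bs x lo hi ≤ k → x ≤ bs[k]) := by
  have hmono : ∀ i j (hi' : i < bs.length) (hj' : j < bs.length), i ≤ j → bs[i] ≤ bs[j] := by
    intro i j hi' hj' hij
    rcases Nat.lt_or_ge i j with h | h
    · exact (List.pairwise_iff_getElem.mp hb) i j hi' hj' h
    · have : i = j := by omega
      subst this; exact le_refl _
  intro lo hi
  induction lo, hi using pvBSearch.induct bs x with
  | case1 lo hi hlt hmid ih =>
      intro _ hhi h1 h2
      have e : pvBSearch bs x lo hi = pvBSearch bs x ((lo + hi) / 2 + 1) hi := by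
        rw [pvBSearch, if_pos hlt, if_pos hmid]
      rw [e]
      have hmlt : (lo + hi) / 2 < bs.length := by omega
      have hmval : bs.getD ((lo + hi) / 2) 0 = bs[(lo + hi) / 2] :=
        List.getD_eq_getElem bs 0 hmlt
      rw [hmval] at hmid
      apply ih (by omega) hhi
      · intro k hk hklt
        exact lt_of_le_of_lt (hmono k ((lo + hi) / 2) hk hmlt (by omega)) hmid
      · exact h2
  | case2 lo hi hlt hmid ih =>
      intro _ hhi h1 h2
      have e : pvBSearch bs x lo hi = pvBSearch bs x lo ((lo + hi) / 2) := by
        rw [pvBSearch, if_pos hlt, if_neg hmid]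
      rw [e]
      have hmlt : (lo + hi) / 2 < bs.length := by omega
      have hmval : bs.getD ((lo + hi) / 2) 0 = bs[(lo + hi) / 2] :=
        List.getD_eq_getElem bs 0 hmlt
      rw [hmval] at hmid
      apply ih (by omega) (by omega) h1
      intro k hk hmk
      exact le_trans (by omega) (hmono ((lo + hi) / 2) k hmlt hk hmk)
  | case3 lo hi hlt =>
      intro hlohi hhi h1 h2
      have e : pvBSearch bs x lo hi = lo := by
        rw [pvBSearch, if_neg hlt]
      rw [e]
      exact ⟨by omega, fun k hk hklo => h1 k hk (by omega), fun k hk hlok => h2 k hk (by omega)⟩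

-- from the boundary, the count of biscuits ≥ x is the length minus the split point
theorem cntGe_boundary (bs : List Int) (x : Int) (l : Nat) (hl : l ≤ bs.length)
    (h1 : ∀ k (hk : k < bs.length), k < l → bs[k] < x)
    (h2 : ∀ k (hk : k < bs.length), l ≤ k → x ≤ bs[k]) :
    pvCntGe bs x = (bs.length : Int) - (l : Int) := by
  have hsplit : bs = bs.take l ++ bs.drop l := (List.take_append_drop l bs).symm
  have htake : (bs.take l).filter (fun y => decide (x ≤ y)) = [] := by
    rw [List.filter_eq_nil_iff]
    intro a ha
    rcases List.mem_iff_getElem.mp ha with ⟨i, hi, rfl⟩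
    have hil : i < l := by have := (bs.take l).length ; simp at hi; omega
    have hib : i < bs.length := by omega
    rw [List.getElem_take]
    simpa using h1 i hib hil
  have hdrop : (bs.drop l).filter (fun y => decide (x ≤ y)) = bs.drop l := by
    rw [List.filter_eq_self]
    intro a ha
    rcases List.mem_iff_getElem.mp ha with ⟨i, hi, rfl⟩
    have hib : l + i < bs.length := by simp at hi; omega
    rw [List.getElem_drop]
    simpa using h2 (l + i) hib (by omega)
  calc pvCntGe bs x = (((bs.take l ++ bs.drop l).filter (fun y => decide (x ≤ y))).length : Int) := by
        rw [pvCntGe, ← hsplit]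
    _ = (bs.length : Int) - (l : Int) := by
        rw [List.filter_append, htake, hdrop]
        simp
        omega

theorem bsearch_cntGe (bs : List Int) (x : Int) (hb : bs.Pairwise (· ≤ ·)) :
    (bs.length : Int) - (pvBSearch bs x 0 bs.length : Int) = pvCntGe bs x := by
  obtain ⟨hle, hlo, hhi⟩ := pvBSearch_boundary bs x hb 0 bs.length (Nat.zero_le _) (le_refl _)
    (fun k _ h => by omega) (fun k hk h => by omega)
  rw [cntGe_boundary bs x _ hle hlo hhi]

-- B's enumerate fold computes max md (Hall deficiency of the remaining suffix)
theorem foldB_maxDef (b : List Int) (hb : b.Pairwise (· ≤ ·)) (n : Int) (t : List Int) :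
    ∀ (k md : Int), k + (t.length : Int) = n → 0 ≤ md →
    ((PySem.List.enumerate t k).foldl (fun (md : Int) ix =>
        let lo := pvBSearch b ix.2 0 b.length
        let d := (n - ix.1) - ((b.length : Int) - (lo : Int))
        if md < d then d else md) md) = max md (pvMaxDef t b) := by
  induction t with
  | nil =>
      intro k md _ hmd
      simp [PySem.List.enumerate_nil, pvMaxDef]
      omega
  | cons x t ih =>
      intro k md hk hmd
      rw [PySem.List.enumerate_cons, List.foldl_cons]
      simp only []
      have hd : (n - k) - ((b.length : Int) - (pvBSearch b x 0 b.length : Int))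
          = (1 + (t.length : Int)) - pvCntGe b x := by
        rw [bsearch_cntGe b x hb]
        simp only [List.length_cons] at hk
        push_cast at hk
        omega
      set d := (n - k) - ((b.length : Int) - (pvBSearch b x 0 b.length : Int)) with hdef
      have hstep : (if md < d then d else md) = max md d := by omega
      rw [hstep, ih (k + 1) (max md d) (by simp at hk ⊢; omega) (by omega)]
      simp only [pvMaxDef]
      omega

-- ===== VERDICT (by name: the statement is the Claim_ definition above) =====
theorem satisfy_dogs_spec : Claim_equal_satisfy_dogs := by
  intro hunger_levels biscuit_sizes _
  unfold Spec_satisfy_dogs satisfy_dogs satisfy_dogs_alt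
  simp only []
  set h := PySem.List.sorted hunger_levels (fun x => x) false with hh
  set b := PySem.List.sorted biscuit_sizes (fun x => x) false with hbdef
  have hps : h.Pairwise (· ≤ ·) := by
    have := PySem.List.sorted_pairwise (xs := hunger_levels) (key := fun x => x)
    simpa [hh] using this
  have hpb : b.Pairwise (· ≤ ·) := by
    have := PySem.List.sorted_pairwise (xs := biscuit_sizes) (key := fun x => x)
    simpa [hbdef] using this
  rw [foldA_greedy h b 0 0 (Nat.zero_le _)]
  rw [foldB_maxDef b hpb (h.length : Int) h 0 0 (by omega) (le_refl 0)]
  have hg := greedy_maxDef h b hps hpb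
  have hnn := maxDef_nonneg h b
  simp only [List.drop_zero]
  omega
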